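-- pv_equiv track=rewrite | github.com/Rahonam/algorithm-syllabus | array/odd_xor_pairs.py | oddXor
-- ===== SOURCE A (Python) =====
-- def oddXor(arr: list):
--     """
--     Find the number of pairs with odd XOR
--
--     For bits:
--         XOR is 0 if same bits, otherwise 1
--
--     For numbers:
--         XOR is odd if one number is odd and another is even, otherwise even
--
--     using: iteration
--
--     Args:
--         arr: array of integers
--
--     Returns:
--         int: count of odd XOR pairs
--     """
--     if len(arr) == 1:
--         return 0
--
--     odd_count = 0
--     even_count = 0
--     for i in arr:
--         if i % 2 == 0:
--             even_count += 1
--         else: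
--             odd_count += 1
--
--     return odd_count * even_count
-- ===== SOURCE B (Python) =====
-- def oddXor(arr: list):
--     count = 0
--     rest = arr
--     while rest:
--         x = rest[0]
--         rest = rest[1:]
--         for y in rest:
--             if x % 2 != y % 2:
--                 count += 1
--     return count
-- ===== Notes on version B (the rewrite author's own statement) =====
-- stated objective: alternative
-- what changed: Replaces the count-odds-and-evens-then-multiply closed form with an explicit scan over all unordered pairs, counting pairs whose parities (via %2) differ.
import Mathlib
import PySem

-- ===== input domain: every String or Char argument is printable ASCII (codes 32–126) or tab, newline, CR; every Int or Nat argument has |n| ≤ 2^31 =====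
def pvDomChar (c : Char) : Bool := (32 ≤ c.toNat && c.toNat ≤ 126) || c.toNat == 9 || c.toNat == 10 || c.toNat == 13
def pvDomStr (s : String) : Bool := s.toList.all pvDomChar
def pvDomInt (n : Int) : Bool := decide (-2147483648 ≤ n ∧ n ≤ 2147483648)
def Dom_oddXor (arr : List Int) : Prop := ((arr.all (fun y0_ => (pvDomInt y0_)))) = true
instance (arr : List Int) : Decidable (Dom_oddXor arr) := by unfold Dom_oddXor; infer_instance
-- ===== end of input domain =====

-- B replaces A's count-odds-and-evens-then-multiply closed form with an explicit scan over all
-- unordered pairs, counting those whose parities (via %2) differ (objective: alternative).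

-- ===== PORT A =====
-- A: early return 0 for singleton, else one pass tallying odd/even counts, result odd*even.
def oddXor (arr : List Int) : Int :=
  if arr.length == 1 then 0
  else
    let s := arr.foldl
      (fun (s : Int × Int) i =>
        if PySem.Int.mod i 2 == 0 then (s.1, s.2 + 1) else (s.1 + 1, s.2))
      (0, 0)
    s.1 * s.2

-- ===== PORT B =====
-- B: while rest nonempty, pop head x, scan the tail for y with x % 2 != y % 2, accumulate count.
def oddXorAltGo : List Int → Int → Int
  | [], count => count
  | x :: rest, count =>
      oddXorAltGo rest
        (rest.foldl
          (fun c y => if PySem.Int.mod x 2 != PySem.Int.mod y 2 then c + 1 else c)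
          count)

def oddXor_alt (arr : List Int) : Int := oddXorAltGo arr 0

-- ===== PRECONDITION & SPEC =====
def Spec_oddXor (arr : List Int) (out : Int) : Prop := out = oddXor_alt arr
instance (arr : List Int) (out : Int) : Decidable (Spec_oddXor arr out) := by unfold Spec_oddXor; infer_instance

-- ===== CLAIM (what is proved, stated in full; the proofs are below) =====
def Claim_equal_oddXor : Prop := ∀ (arr : List Int), Dom_oddXor arr → Spec_oddXor arr (oddXor arr)

-- ===== LEMMAS AND PROOFS =====

-- number of odd / even elements (by Python %2) in a list
def pvOdds : List Int → Int
  | [] => 0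
  | x :: xs => (if PySem.Int.mod x 2 == 0 then 0 else 1) + pvOdds xs

def pvEvens : List Int → Int
  | [] => 0
  | x :: xs => (if PySem.Int.mod x 2 == 0 then 1 else 0) + pvEvens xs

theorem pvFoldA_eq (xs : List Int) (o e : Int) :
    xs.foldl
      (fun (s : Int × Int) i =>
        if PySem.Int.mod i 2 == 0 then (s.1, s.2 + 1) else (s.1 + 1, s.2))
      (o, e) = (o + pvOdds xs, e + pvEvens xs) := by
  induction xs generalizing o e with
  | nil => simp [pvOdds, pvEvens]
  | cons x xs ih =>
      rw [List.foldl_cons]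
      simp only [pvOdds, pvEvens]
      by_cases h : (PySem.Int.mod x 2 == 0) = true <;>
        simp only [h, if_true, Bool.false_eq_true, if_false, Bool.not_eq_true, ih, Prod.mk.injEq] <;>
          constructor <;> ring

-- Python's i % 2 is 0 or 1
theorem pvMod2 (i : Int) : PySem.Int.mod i 2 = 0 ∨ PySem.Int.mod i 2 = 1 := by
  have := PySem.Int.mod_two_eq i
  tauto

-- the inner scan adds the number of opposite-parity elements
theorem pvInner_eq (x : Int) (xs : List Int) (c : Int) :
    xs.foldl (fun c y => if PySem.Int.mod x 2 != PySem.Int.mod y 2 then c + 1 else c) c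
      = c + (if PySem.Int.mod x 2 == 0 then pvOdds xs else pvEvens xs) := by
  induction xs generalizing c with
  | nil => simp [pvOdds, pvEvens]
  | cons y ys ih =>
      rw [List.foldl_cons, ih]
      simp only [pvOdds, pvEvens]
      rcases pvMod2 x with hx | hx <;> rcases pvMod2 y with hy | hy <;>
        rw [hx, hy] <;> norm_num <;> ring

theorem pvGo_eq (xs : List Int) (c : Int) :
    oddXorAltGo xs c = c + pvOdds xs * pvEvens xs := by
  induction xs generalizing c with
  | nil => simp [oddXorAltGo, pvOdds, pvEvens]
  | cons x xs ih =>
      rw [oddXorAltGo, pvInner_eq, ih]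
      simp only [pvOdds, pvEvens]
      by_cases h : (PySem.Int.mod x 2 == 0) = true <;>
        simp only [h, if_true, Bool.false_eq_true, if_false, Bool.not_eq_true] <;> ring

theorem pvAlt_closed (arr : List Int) : oddXor_alt arr = pvOdds arr * pvEvens arr := by
  rw [oddXor_alt, pvGo_eq]; ring

-- ===== VERDICT (by name: the statement is the Claim_ definition above) =====
theorem oddXor_spec : Claim_equal_oddXor := by
  intro arr _
  unfold Spec_oddXor oddXor
  rw [pvAlt_closed]
  by_cases h : arr.length == 1
  · simp only [h, if_true]
    match arr, h with
    | [x], _ =>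
        simp only [pvOdds, pvEvens]
        by_cases hx : PySem.Int.mod x 2 == 0 <;> simp [hx]
  · rw [if_neg h, pvFoldA_eq]
    ring_nf
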